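-- pv_equiv track=rewrite | github.com/pypi-data/pypi-mirror-389 | packages/gns3-mcp/gns3_mcp-0.46.4-py3-none-any.whl/gns3_mcp/server/prompts/lab_setup.py | generate_bgp_ips
-- ===== SOURCE A (Python) =====
-- from typing import Dict, List, Tuple
--
-- def generate_bgp_ips(as_count: int) -> Dict[str, Dict[str, str]]:
--     """Generate IP addresses for BGP topology
--
--     Args:
--         as_count: Number of Autonomous Systems
--
--     Returns:
--         Dict mapping node names to interface IP configs
--     """
--     ips = {}
--
--     for as_idx in range(1, as_count + 1):
--         # iBGP link within AS
--         ips[f"AS{as_idx}-R1"] = {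
--             "Loopback0": f"192.168.{as_idx}.1/32",
--             "Gi0/0": f"10.{as_idx}.1.1/30",  # iBGP link
--         }
--         ips[f"AS{as_idx}-R2"] = {
--             "Loopback0": f"192.168.{as_idx}.2/32",
--             "Gi0/0": f"10.{as_idx}.1.2/30",  # iBGP link
--         }
--
--     # eBGP links use 172.16.x.x range
--     ebgp_subnet = 1
--     for as_idx in range(1, as_count):
--         ips[f"AS{as_idx}-R2"]["Gi0/1"] = f"172.16.{ebgp_subnet}.1/30"
--         ips[f"AS{as_idx + 1}-R1"]["Gi0/1"] = f"172.16.{ebgp_subnet}.2/30"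
--         ebgp_subnet += 1
--
--     # Close the circle
--     if as_count > 2:
--         ips[f"AS{as_count}-R2"]["Gi0/1"] = f"172.16.{ebgp_subnet}.1/30"
--         ips["AS1-R1"]["Gi0/1"] = f"172.16.{ebgp_subnet}.2/30"
--
--     return ips
-- ===== SOURCE B (Python) =====
-- def _r1_config(i, as_count):
--     """Complete interface config for AS{i}-R1 (Gi0/1 decided from the node's own index)."""
--     cfg = {"Loopback0": f"192.168.{i}.1/32", "Gi0/0": f"10.{i}.1.1/30"}
--     if i > 1:
--         cfg["Gi0/1"] = f"172.16.{i - 1}.2/30"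
--     elif as_count > 2:
--         cfg["Gi0/1"] = f"172.16.{as_count}.2/30"
--     return cfg
--
--
-- def _r2_config(i, as_count):
--     """Complete interface config for AS{i}-R2 (Gi0/1 decided from the node's own index)."""
--     cfg = {"Loopback0": f"192.168.{i}.2/32", "Gi0/0": f"10.{i}.1.2/30"}
--     if i < as_count:
--         cfg["Gi0/1"] = f"172.16.{i}.1/30"
--     elif as_count > 2:
--         cfg["Gi0/1"] = f"172.16.{as_count}.1/30"
--     return cfg
--
--
-- def generate_bgp_ips(as_count):
--     """Generate IP addresses for BGP topology (single pass: each node emitted complete)."""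
--     as_indices = list(range(1, as_count + 1))
--     ips = {}
--     for i in as_indices:
--         ips[f"AS{i}-R1"] = _r1_config(i, as_count)
--         ips[f"AS{i}-R2"] = _r2_config(i, as_count)
--     return ips
-- ===== Notes on version B (the rewrite author's own statement) =====
-- stated objective: simpler
-- what changed: Single pass that emits each node's complete interface dict at once (Gi0/1 decided per node from its index), replacing A's build-skeleton-then-patch structure of two loops plus a ring-closing special case.
import Mathlib
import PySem

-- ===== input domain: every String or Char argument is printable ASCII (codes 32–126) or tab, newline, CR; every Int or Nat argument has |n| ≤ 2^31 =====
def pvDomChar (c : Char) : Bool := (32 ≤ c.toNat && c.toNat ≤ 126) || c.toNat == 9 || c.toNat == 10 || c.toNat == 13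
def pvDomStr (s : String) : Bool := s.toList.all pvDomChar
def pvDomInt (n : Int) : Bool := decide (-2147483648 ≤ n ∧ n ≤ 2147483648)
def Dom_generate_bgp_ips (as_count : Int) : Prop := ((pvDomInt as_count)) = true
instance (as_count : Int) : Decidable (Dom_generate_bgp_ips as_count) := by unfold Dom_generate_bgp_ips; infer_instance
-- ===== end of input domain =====

-- B builds each node's complete interface dict in one pass (simpler decomposition); A builds a skeleton then patches Gi0/1 in a second loop plus a ring-closing case.

-- ===== PORT A =====
-- shared f-string formatters (identical string expressions in both Pythons)
def nR1 (i : Int) : String := "AS" ++ PySem.Int.toStr i ++ "-R1"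
def nR2 (i : Int) : String := "AS" ++ PySem.Int.toStr i ++ "-R2"
def e1 (s : Int) : String := "172.16." ++ PySem.Int.toStr s ++ ".1/30"
def e2 (s : Int) : String := "172.16." ++ PySem.Int.toStr s ++ ".2/30"
def baseR1 (i : Int) : PySem.Dict String String :=
  PySem.Dict.ofList [("Loopback0", "192.168." ++ PySem.Int.toStr i ++ ".1/32"),
                     ("Gi0/0", "10." ++ PySem.Int.toStr i ++ ".1.1/30")]
def baseR2 (i : Int) : PySem.Dict String String :=
  PySem.Dict.ofList [("Loopback0", "192.168." ++ PySem.Int.toStr i ++ ".2/32"),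
                     ("Gi0/0", "10." ++ PySem.Int.toStr i ++ ".1.2/30")]

def generate_bgp_ips (as_count : Int) : List (String × List (String × String)) :=
  -- first loop: skeleton entries for every AS
  let ips0 : PySem.Dict String (PySem.Dict String String) :=
    (PySem.List.pyRange 1 (as_count + 1)).foldl
      (fun d i => (d.insert (nR1 i) (baseR1 i)).insert (nR2 i) (baseR2 i))
      PySem.Dict.empty
  -- second loop: eBGP patches, carrying ebgp_subnet
  let st : PySem.Dict String (PySem.Dict String String) × Int :=
    (PySem.List.pyRange 1 as_count).foldl
      (fun st i =>
        (((st.1.modify (nR2 i) PySem.Dict.empty (fun m => m.insert "Gi0/1" (e1 st.2))).modify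
            (nR1 (i + 1)) PySem.Dict.empty (fun m => m.insert "Gi0/1" (e2 st.2))), st.2 + 1))
      (ips0, 1)
  -- close the circle
  let ips : PySem.Dict String (PySem.Dict String String) :=
    if as_count > 2 then
      (st.1.modify (nR2 as_count) PySem.Dict.empty (fun m => m.insert "Gi0/1" (e1 st.2))).modify
        (nR1 1) PySem.Dict.empty (fun m => m.insert "Gi0/1" (e2 st.2))
    else st.1
  ips.items.map (fun p => (p.1, p.2.items))

-- ===== PORT B =====
def fullR1 (n i : Int) : PySem.Dict String String :=
  if i > 1 then (baseR1 i).insert "Gi0/1" (e2 (i - 1))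
  else if n > 2 then (baseR1 i).insert "Gi0/1" (e2 n)
  else baseR1 i
def fullR2 (n i : Int) : PySem.Dict String String :=
  if i < n then (baseR2 i).insert "Gi0/1" (e1 i)
  else if n > 2 then (baseR2 i).insert "Gi0/1" (e1 n)
  else baseR2 i

def generate_bgp_ips_alt (as_count : Int) : List (String × List (String × String)) :=
  ((PySem.List.pyRange 1 (as_count + 1)).foldl
      (fun d i => (d.insert (nR1 i) (fullR1 as_count i)).insert (nR2 i) (fullR2 as_count i))
      PySem.Dict.empty).items.map (fun p => (p.1, p.2.items))

-- ===== PRECONDITION & SPEC =====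
def Spec_generate_bgp_ips (as_count : Int) (out : List (String × List (String × String))) : Prop := out = generate_bgp_ips_alt as_count
instance (as_count : Int) (out : List (String × List (String × String))) : Decidable (Spec_generate_bgp_ips as_count out) := by unfold Spec_generate_bgp_ips; infer_instance

-- ===== CLAIM (what is proved, stated in full; the proofs are below) =====
def Claim_equal_generate_bgp_ips : Prop := ∀ (as_count : Int), Dom_generate_bgp_ips as_count → Spec_generate_bgp_ips as_count (generate_bgp_ips as_count)

-- ===== LEMMAS AND PROOFS =====

-- `str(i)` is injective on positive ints (via Nat.digits)
lemma toDigitsCore_eq_digits (f : ℕ) : ∀ (n : ℕ) (l : List Char), 0 < n → n < f →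
    Nat.toDigitsCore 10 f n l = ((Nat.digits 10 n).map Nat.digitChar).reverse ++ l := by
  induction f with
  | zero => intro n l h1 h2; omega
  | succ f ih =>
    intro n l h1 h2
    rw [Nat.toDigitsCore]
    rw [Nat.digits_def' (by norm_num : 1 < 10) h1]
    by_cases hd : n / 10 = 0
    · rw [if_pos hd, hd]
      simp
    · rw [if_neg hd, ih (n / 10) _ (by omega) (by omega)]
      simp

lemma toDigits_eq_digits (n : ℕ) (h : 0 < n) :
    Nat.toDigits 10 n = ((Nat.digits 10 n).map Nat.digitChar).reverse := by
  rw [Nat.toDigits, toDigitsCore_eq_digits (n + 1) n [] h (by omega), List.append_nil]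

lemma digitChar_inj {a b : ℕ} (ha : a < 10) (hb : b < 10) (h : Nat.digitChar a = Nat.digitChar b) : a = b := by
  interval_cases a <;> interval_cases b <;> simp_all [Nat.digitChar]

lemma map_digitChar_inj : ∀ (xs ys : List ℕ), (∀ x ∈ xs, x < 10) → (∀ y ∈ ys, y < 10) →
    xs.map Nat.digitChar = ys.map Nat.digitChar → xs = ys := by
  intro xs
  induction xs with
  | nil => intro ys _ _ h; cases ys <;> simp_all
  | cons x xs ih =>
    intro ys hx hy h
    cases ys with
    | nil => simp_all
    | cons y ys =>
      simp only [List.map_cons, List.cons.injEq] at h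
      have := digitChar_inj (hx x (by simp)) (hy y (by simp)) h.1
      have := ih ys (fun a ha => hx a (by simp [ha])) (fun a ha => hy a (by simp [ha])) h.2
      simp_all

lemma toStr_inj {i j : Int} (hi : 0 < i) (hj : 0 < j) (h : PySem.Int.toStr i = PySem.Int.toStr j) : i = j := by
  have h' := congrArg String.toList h
  rw [PySem.Int.toList_toStr, PySem.Int.toList_toStr] at h'
  unfold PySem.Int.toChars at h'
  rw [if_neg (by omega), if_neg (by omega)] at h'
  rw [toDigits_eq_digits _ (by omega), toDigits_eq_digits _ (by omega)] at h'
  have h2 := List.reverse_injective h'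
  have h3 := map_digitChar_inj _ _ (fun x hx => Nat.digits_lt_base (by norm_num) hx)
    (fun y hy => Nat.digits_lt_base (by norm_num) hy) h2
  have h4 : i.toNat = j.toNat := by
    have := congrArg (Nat.ofDigits 10) h3
    rwa [Nat.ofDigits_digits, Nat.ofDigits_digits] at this
  omega

-- node-name distinctness
lemma nR1_inj {i j : Int} (hi : 0 < i) (hj : 0 < j) (h : nR1 i = nR1 j) : i = j := by
  unfold nR1 at h
  have h' := congrArg String.toList h
  simp only [String.toList_append] at h'
  exact toStr_inj hi hj (String.toList_inj.mp (List.append_cancel_left (List.append_cancel_right h')))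

lemma nR2_inj {i j : Int} (hi : 0 < i) (hj : 0 < j) (h : nR2 i = nR2 j) : i = j := by
  unfold nR2 at h
  have h' := congrArg String.toList h
  simp only [String.toList_append] at h'
  exact toStr_inj hi hj (String.toList_inj.mp (List.append_cancel_left (List.append_cancel_right h')))

lemma nR1_ne_nR2 (i j : Int) : nR1 i ≠ nR2 j := by
  intro h
  unfold nR1 nR2 at h
  have h' := congrArg String.toList h
  simp only [String.toList_append, PySem.Int.toList_toStr] at h'
  have h2 := congrArg (fun l => l.reverse.head?) h'
  simp [show ("AS" : String).toList = ['A','S'] by rfl, show ("-R1" : String).toList = ['-','R','1'] by rfl,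
        show ("-R2" : String).toList = ['-','R','2'] by rfl] at h2

-- generic dict-as-list lemmas
lemma insert_mk_fresh {ν : Type} (L : List (String × ν)) (k : String) (v : ν)
    (h : ∀ p ∈ L, p.1 ≠ k) : (PySem.Dict.mk L).insert k v = PySem.Dict.mk (L ++ [(k, v)]) := by
  unfold PySem.Dict.insert
  rw [if_neg]
  simp [PySem.Dict.contains]
  intro a hab
  exact h (k, a) hab rfl

lemma get?_mk_first {ν : Type} (L1 L2 : List (String × ν)) (k : String) (v : ν)
    (h1 : ∀ p ∈ L1, p.1 ≠ k) : (PySem.Dict.mk (L1 ++ (k, v) :: L2)).get? k = some v := by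
  induction L1 with
  | nil => simp [PySem.Dict.get?_mk_cons]
  | cons p L1 ih =>
    rw [List.cons_append, PySem.Dict.get?_mk_cons, if_neg]
    · exact ih (fun q hq => h1 q (by simp [hq]))
    · simp [h1 p (by simp)]

lemma modify_mk_mid {ν : Type} (L1 L2 : List (String × ν)) (k : String) (v : ν) (dflt : ν) (f : ν → ν)
    (h1 : ∀ p ∈ L1, p.1 ≠ k) (h2 : ∀ p ∈ L2, p.1 ≠ k) :
    (PySem.Dict.mk (L1 ++ (k, v) :: L2)).modify k dflt f = PySem.Dict.mk (L1 ++ (k, f v) :: L2) := by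
  have hg : (PySem.Dict.mk (L1 ++ (k, v) :: L2)).getD k dflt = v := by
    rw [PySem.Dict.getD_eq_get?_getD, get?_mk_first L1 L2 k v h1]; rfl
  have hc : (PySem.Dict.mk (L1 ++ (k, v) :: L2)).contains k = true := by
    simp [PySem.Dict.contains]
  rw [PySem.Dict.modify, PySem.Dict.insert, if_pos hc, hg]
  congr 1
  simp only [List.map_append, List.map_cons]
  congr 1
  · exact List.map_congr_left (fun p hp => by simp [h1 p hp]) |>.trans (List.map_id _)
  · rw [beq_self_eq_true]
    simp only [if_pos]
    congr 1
    exact List.map_congr_left (fun p hp => by simp [h2 p hp]) |>.trans (List.map_id _)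

-- the block / flat-list view of both builds
def blkL (F G : Int → PySem.Dict String String) (i : Int) : List (String × PySem.Dict String String) :=
  [(nR1 i, F i), (nR2 i, G i)]
def flatL (F G : Int → PySem.Dict String String) (lo hi : Int) : List (String × PySem.Dict String String) :=
  (PySem.List.pyRange lo hi).flatMap (blkL F G)

lemma flat_ne_nR1 {F G : Int → PySem.Dict String String} {lo hi j : Int} (hlo : 0 < lo) (hj : 0 < j)
    (hout : j < lo ∨ hi ≤ j) : ∀ p ∈ flatL F G lo hi, p.1 ≠ nR1 j := by
  intro p hp
  simp only [flatL, List.mem_flatMap, PySem.List.mem_pyRange_one, blkL] at hp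
  obtain ⟨i, ⟨hi1, hi2⟩, hmem⟩ := hp
  simp only [List.mem_cons] at hmem
  rcases hmem with h | h | h
  · subst h; intro he; have := nR1_inj (by omega) hj he; omega
  · subst h; intro he; exact nR1_ne_nR2 j i he.symm
  · simp at h

lemma flat_ne_nR2 {F G : Int → PySem.Dict String String} {lo hi j : Int} (hlo : 0 < lo) (hj : 0 < j)
    (hout : j < lo ∨ hi ≤ j) : ∀ p ∈ flatL F G lo hi, p.1 ≠ nR2 j := by
  intro p hp
  simp only [flatL, List.mem_flatMap, PySem.List.mem_pyRange_one, blkL] at hp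
  obtain ⟨i, ⟨hi1, hi2⟩, hmem⟩ := hp
  simp only [List.mem_cons] at hmem
  rcases hmem with h | h | h
  · subst h; intro he; exact nR1_ne_nR2 i j he
  · subst h; intro he; have := nR2_inj (by omega) hj he; omega
  · simp at h

lemma flat_congr {F F' G G' : Int → PySem.Dict String String} {lo hi : Int}
    (h : ∀ i, lo ≤ i → i < hi → F i = F' i ∧ G i = G' i) :
    flatL F G lo hi = flatL F' G' lo hi := by
  unfold flatL
  apply List.flatMap_congr
  intro i hi
  rw [PySem.List.mem_pyRange_one] at hi
  unfold blkL
  rw [(h i hi.1 hi.2).1, (h i hi.1 hi.2).2]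

lemma flat_split (F G : Int → PySem.Dict String String) {lo mid hi : Int} (h1 : lo ≤ mid) (h2 : mid ≤ hi) :
    flatL F G lo hi = flatL F G lo mid ++ flatL F G mid hi := by
  unfold flatL
  rw [PySem.List.pyRange_one_append lo mid hi h1 h2, List.flatMap_append]

lemma flat_single (F G : Int → PySem.Dict String String) (j : Int) :
    flatL F G j (j + 1) = [(nR1 j, F j), (nR2 j, G j)] := by
  unfold flatL
  rw [PySem.List.pyRange_one_cons (by omega : j < j + 1)]
  simp [PySem.List.pyRange, blkL]

-- phase 1 of A and the single loop of B: building over fresh keys appends blocks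
lemma build_eq (F G : Int → PySem.Dict String String) : ∀ b : Int, 0 ≤ b →
    (PySem.List.pyRange 1 (b + 1)).foldl
      (fun d i => (d.insert (nR1 i) (F i)).insert (nR2 i) (G i)) PySem.Dict.empty
    = PySem.Dict.mk (flatL F G 1 (b + 1)) := by
  intro b hb
  induction b, hb using Int.le_induction with
  | base =>
    rw [show PySem.List.pyRange 1 (0 + 1 : Int) = [] by decide, List.foldl_nil]
    simp [flatL, PySem.Dict.empty]
  | succ b hb ih =>
    rw [show (b + 1 + 1 : Int) = (b + 1) + 1 by ring, PySem.List.pyRange_one_succ_right (by omega),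
        List.foldl_append, ih, List.foldl_cons, List.foldl_nil]
    rw [insert_mk_fresh _ _ _ (flat_ne_nR1 (by omega) (by omega) (by omega))]
    rw [insert_mk_fresh _ _ _ ?fresh2]
    · rw [flat_split F G (by omega : (1:Int) ≤ b + 1) (by omega : (b+1:Int) ≤ b + 1 + 1),
          flat_single]
      simp
    · intro p hp
      rcases List.mem_append.mp hp with h | h
      · exact flat_ne_nR2 (by omega) (by omega) (by omega) p h
      · simp at h; subst h; exact nR1_ne_nR2 (b+1) (b+1)

-- patched-block state of A's second loop after the first m iterations
def P1 (m i : Int) : PySem.Dict String String :=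
  if 2 ≤ i ∧ i ≤ m + 1 then (baseR1 i).insert "Gi0/1" (e2 (i - 1)) else baseR1 i
def P2 (m i : Int) : PySem.Dict String String :=
  if i ≤ m then (baseR2 i).insert "Gi0/1" (e1 i) else baseR2 i

lemma P1_shift {m m' i : Int} (h : (2 ≤ i ∧ i ≤ m + 1) ↔ (2 ≤ i ∧ i ≤ m' + 1)) : P1 m i = P1 m' i := by
  unfold P1
  by_cases hc : 2 ≤ i ∧ i ≤ m + 1
  · rw [if_pos hc, if_pos (h.mp hc)]
  · rw [if_neg hc, if_neg (fun hc' => hc (h.mpr hc'))]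

lemma P2_shift {m m' i : Int} (h : (i ≤ m) ↔ (i ≤ m')) : P2 m i = P2 m' i := by
  unfold P2
  by_cases hc : i ≤ m
  · rw [if_pos hc, if_pos (h.mp hc)]
  · rw [if_neg hc, if_neg (fun hc' => hc (h.mpr hc'))]

lemma phase2 (n : Int) : ∀ m : Int, 0 ≤ m → m ≤ n - 1 →
    (PySem.List.pyRange 1 (m + 1)).foldl
      (fun st i =>
        (((st.1.modify (nR2 i) PySem.Dict.empty (fun d => d.insert "Gi0/1" (e1 st.2))).modify
            (nR1 (i + 1)) PySem.Dict.empty (fun d => d.insert "Gi0/1" (e2 st.2))), st.2 + 1))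
      (PySem.Dict.mk (flatL baseR1 baseR2 1 (n + 1)), 1)
    = (PySem.Dict.mk (flatL (P1 m) (P2 m) 1 (n + 1)), m + 1) := by
  intro m hm
  induction m, hm using Int.le_induction with
  | base =>
    intro _
    rw [show PySem.List.pyRange 1 (0 + 1 : Int) = [] by decide, List.foldl_nil,
        show flatL baseR1 baseR2 1 (n + 1) = flatL (P1 0) (P2 0) 1 (n + 1) from
          flat_congr (fun i h1 h2 => ⟨by unfold P1; rw [if_neg (by omega)],
                                      by unfold P2; rw [if_neg (by omega)]⟩)]
    norm_num
  | succ m hm ih =>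
    intro hle
    have ih' := ih (by omega)
    rw [show (m + 1 + 1 : Int) = (m + 1) + 1 by ring, PySem.List.pyRange_one_succ_right (by omega),
        List.foldl_append, ih', List.foldl_cons, List.foldl_nil]
    simp only []
    rw [show (m + 1 + 1 : Int) = m + 2 by ring]
    have hsplit : flatL (P1 m) (P2 m) 1 (n + 1)
        = (flatL (P1 m) (P2 m) 1 (m + 1) ++ [(nR1 (m+1), P1 m (m+1))])
          ++ (nR2 (m+1), baseR2 (m+1))
          :: ((nR1 (m+2), P1 m (m+2)) :: (nR2 (m+2), P2 m (m+2)) :: flatL (P1 m) (P2 m) (m + 3) (n + 1)) := by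
      rw [flat_split _ _ (by omega : (1:Int) ≤ m + 1) (by omega : (m+1:Int) ≤ n + 1),
          flat_split _ _ (by omega : (m+1:Int) ≤ (m+1) + 1) (by omega : ((m+1)+1:Int) ≤ n + 1),
          flat_split _ _ (by omega : ((m+1)+1:Int) ≤ ((m+1)+1) + 1) (by omega : (((m+1)+1)+1:Int) ≤ n + 1),
          flat_single, flat_single]
      have h1 : P2 m (m+1) = baseR2 (m+1) := by unfold P2; rw [if_neg (by omega)]
      simp [h1, show ((m+1)+1:Int) = m+2 by ring, show ((m+2)+1:Int) = m+3 by ring]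
    rw [hsplit, modify_mk_mid _ _ _ _ _ _ ?f1 ?f2]
    case f1 =>
      intro p hp
      rcases List.mem_append.mp hp with h | h
      · exact flat_ne_nR2 (by omega) (by omega) (by omega) p h
      · simp at h; subst h; exact nR1_ne_nR2 (m+1) (m+1)
    case f2 =>
      intro p hp
      simp only [List.mem_cons] at hp
      rcases hp with h | h | h
      · subst h; exact nR1_ne_nR2 (m+2) (m+1)
      · subst h; intro he; have := nR2_inj (by omega) (by omega) he; omega
      · exact flat_ne_nR2 (by omega) (by omega) (by omega) p h
    have hre : (flatL (P1 m) (P2 m) 1 (m + 1) ++ [(nR1 (m+1), P1 m (m+1))])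
          ++ (nR2 (m+1), (baseR2 (m+1)).insert "Gi0/1" (e1 (m+1)))
          :: ((nR1 (m+2), P1 m (m+2)) :: (nR2 (m+2), P2 m (m+2)) :: flatL (P1 m) (P2 m) (m + 3) (n + 1))
        = (flatL (P1 m) (P2 m) 1 (m + 1)
            ++ [(nR1 (m+1), P1 m (m+1)), (nR2 (m+1), (baseR2 (m+1)).insert "Gi0/1" (e1 (m+1)))])
          ++ (nR1 (m+2), P1 m (m+2))
          :: ((nR2 (m+2), P2 m (m+2)) :: flatL (P1 m) (P2 m) (m + 3) (n + 1)) := by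
      simp
    rw [hre]
    have hv : P1 m (m+2) = baseR1 (m+2) := by unfold P1; rw [if_neg (by omega)]
    rw [hv, modify_mk_mid _ _ _ _ _ _ ?g1 ?g2]
    case g1 =>
      intro p hp
      rcases List.mem_append.mp hp with h | h
      · exact flat_ne_nR1 (by omega) (by omega) (by omega) p h
      · simp only [List.mem_cons] at h
        rcases h with h | h | h
        · subst h; intro he; have := nR1_inj (by omega) (by omega) he; omega
        · subst h; exact fun he => nR1_ne_nR2 (m+2) (m+1) he.symm
        · simp at h
    case g2 =>
      intro p hp
      simp only [List.mem_cons] at hp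
      rcases hp with h | h
      · subst h; exact fun he => nR1_ne_nR2 (m+2) (m+2) he.symm
      · exact flat_ne_nR1 (by omega) (by omega) (by omega) p h
    -- reassemble: the patched list is exactly the (m+1)-state
    have htgt : flatL (P1 (m+1)) (P2 (m+1)) 1 (n + 1)
        = (flatL (P1 m) (P2 m) 1 (m + 1)
            ++ [(nR1 (m+1), P1 m (m+1)), (nR2 (m+1), (baseR2 (m+1)).insert "Gi0/1" (e1 (m+1)))])
          ++ (nR1 (m+2), (baseR1 (m+2)).insert "Gi0/1" (e2 (m+1)))
          :: ((nR2 (m+2), P2 m (m+2)) :: flatL (P1 m) (P2 m) (m + 3) (n + 1)) := by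
      rw [flat_split _ _ (by omega : (1:Int) ≤ m + 1) (by omega : (m+1:Int) ≤ n + 1),
          flat_split _ _ (by omega : (m+1:Int) ≤ (m+1) + 1) (by omega : ((m+1)+1:Int) ≤ n + 1),
          flat_split _ _ (by omega : ((m+1)+1:Int) ≤ ((m+1)+1) + 1) (by omega : (((m+1)+1)+1:Int) ≤ n + 1),
          flat_single, flat_single]
      rw [show flatL (P1 (m+1)) (P2 (m+1)) 1 (m+1) = flatL (P1 m) (P2 m) 1 (m+1) from
            flat_congr (fun i h1 h2 => ⟨P1_shift (by omega), P2_shift (by omega)⟩),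
          show flatL (P1 (m+1)) (P2 (m+1)) (((m+1)+1)+1) (n+1) = flatL (P1 m) (P2 m) (((m+1)+1)+1) (n+1) from
            flat_congr (fun i h1 h2 => ⟨P1_shift (by omega), P2_shift (by omega)⟩)]
      have e1' : P1 (m+1) (m+1) = P1 m (m+1) := P1_shift (by omega)
      have e2' : P2 (m+1) (m+1) = (baseR2 (m+1)).insert "Gi0/1" (e1 (m+1)) := by
        unfold P2; rw [if_pos (by omega)]
      have e3' : P1 (m+1) (m+2) = (baseR1 (m+2)).insert "Gi0/1" (e2 (m+1)) := by
        unfold P1; rw [if_pos (by omega), show ((m+2:Int) - 1) = m+1 by ring]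
      have e4' : P2 (m+1) (m+2) = P2 m (m+2) := P2_shift (by omega)
      simp [e1', e2', e3', e4', show ((m+1)+1:Int) = m+2 by ring, show ((m+2)+1:Int) = m+3 by ring]
    rw [htgt]

-- n ≤ 2: no ring closure, B's per-node conditions coincide with A's patched state
lemma flat_small_eq {n : Int} (hn2 : ¬ n > 2) :
    flatL (P1 (n-1)) (P2 (n-1)) 1 (n + 1) = flatL (fullR1 n) (fullR2 n) 1 (n + 1) := by
  apply flat_congr
  intro i h1 h2
  constructor
  · unfold P1 fullR1
    split_ifs <;> first | rfl | omega
  · unfold P2 fullR2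
    split_ifs <;> first | rfl | omega

-- ===== VERDICT =====
theorem generate_bgp_ips_spec : Claim_equal_generate_bgp_ips := by
  intro n _
  unfold Spec_generate_bgp_ips generate_bgp_ips generate_bgp_ips_alt
  dsimp only
  by_cases hn : 1 ≤ n
  · rw [build_eq baseR1 baseR2 n (by omega), build_eq (fullR1 n) (fullR2 n) n (by omega)]
    have hph := phase2 n (n - 1) (by omega) (by omega)
    rw [show ((n-1)+1:Int) = n by ring] at hph
    rw [hph]
    simp only []
    by_cases h3 : n > 2
    · rw [if_pos h3]
      have hP2n : P2 (n-1) n = baseR2 n := by unfold P2; rw [if_neg (by omega)]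
      have hP11 : P1 (n-1) 1 = baseR1 1 := by unfold P1; rw [if_neg (by omega)]
      have hs1 : flatL (P1 (n-1)) (P2 (n-1)) 1 (n+1)
          = (flatL (P1 (n-1)) (P2 (n-1)) 1 n ++ [(nR1 n, P1 (n-1) n)]) ++ (nR2 n, baseR2 n) :: [] := by
        rw [flat_split _ _ (by omega : (1:Int) ≤ n) (by omega : (n:Int) ≤ n+1), flat_single, hP2n]
        simp
      rw [hs1, modify_mk_mid _ _ _ _ _ _ ?c1 ?c2]
      case c1 =>
        intro p hp
        rcases List.mem_append.mp hp with h | h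
        · exact flat_ne_nR2 (by omega) (by omega) (by omega) p h
        · simp at h; subst h; exact nR1_ne_nR2 n n
      case c2 => intro p hp; simp at hp
      have hs2 : (flatL (P1 (n-1)) (P2 (n-1)) 1 n ++ [(nR1 n, P1 (n-1) n)])
            ++ (nR2 n, (baseR2 n).insert "Gi0/1" (e1 n)) :: ([] : List (String × PySem.Dict String String))
          = [] ++ (nR1 1, baseR1 1)
            :: ((nR2 1, P2 (n-1) 1) :: (flatL (P1 (n-1)) (P2 (n-1)) 2 n
                ++ [(nR1 n, P1 (n-1) n), (nR2 n, (baseR2 n).insert "Gi0/1" (e1 n))])) := by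
        rw [flat_split _ _ (by omega : (1:Int) ≤ 2) (by omega : (2:Int) ≤ n),
            show (2:Int) = 1 + 1 by ring, flat_single, hP11]
        simp
      rw [hs2, modify_mk_mid _ _ _ _ _ _ ?d1 ?d2]
      case d1 => intro p hp; simp at hp
      case d2 =>
        intro p hp
        rcases List.mem_cons.mp hp with h | h
        · subst h; exact fun he => nR1_ne_nR2 1 1 he.symm
        rcases List.mem_append.mp h with h2 | h2
        · exact flat_ne_nR1 (by omega) (by omega) (by omega) p h2
        · simp only [List.mem_cons] at h2
          rcases h2 with h2 | h2 | h2
          · subst h2; intro he; have := nR1_inj (by omega) (by omega) he; omega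
          · subst h2; exact fun he => nR1_ne_nR2 1 n he.symm
          · simp at h2
      have htail : flatL (fullR1 n) (fullR2 n) 1 (n+1)
          = [] ++ (nR1 1, (baseR1 1).insert "Gi0/1" (e2 n))
            :: ((nR2 1, P2 (n-1) 1) :: (flatL (P1 (n-1)) (P2 (n-1)) 2 n
                ++ [(nR1 n, P1 (n-1) n), (nR2 n, (baseR2 n).insert "Gi0/1" (e1 n))])) := by
        rw [flat_split _ _ (by omega : (1:Int) ≤ 2) (by omega : (2:Int) ≤ n+1),
            flat_split _ _ (by omega : (2:Int) ≤ n) (by omega : (n:Int) ≤ n+1),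
            flat_single,
            show (2:Int) = 1 + 1 by ring, flat_single]
        rw [show flatL (fullR1 n) (fullR2 n) (1+1) n = flatL (P1 (n-1)) (P2 (n-1)) (1+1) n from
              flat_congr (fun i hi1 hi2 => ⟨by unfold fullR1 P1; split_ifs <;> first | rfl | omega,
                                            by unfold fullR2 P2; split_ifs <;> first | rfl | omega⟩)]
        have v1 : fullR1 n 1 = (baseR1 1).insert "Gi0/1" (e2 n) := by
          unfold fullR1; rw [if_neg (by omega), if_pos h3]
        have v2 : fullR2 n 1 = P2 (n-1) 1 := by
          unfold fullR2 P2; rw [if_pos (by omega), if_pos (by omega)]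
        have v3 : fullR1 n n = P1 (n-1) n := by
          unfold fullR1 P1; rw [if_pos (by omega), if_pos (by omega)]
        have v4 : fullR2 n n = (baseR2 n).insert "Gi0/1" (e1 n) := by
          unfold fullR2; rw [if_neg (by omega), if_pos h3]
        simp [v1, v2, v3, v4]
      rw [htail]
    · rw [if_neg h3, flat_small_eq h3]
  · rw [show PySem.List.pyRange 1 (n + 1) = [] by
        simp [PySem.List.pyRange]; omega,
        show PySem.List.pyRange 1 n = [] by
        simp [PySem.List.pyRange]; omega]
    simp only [List.foldl_nil]
    rw [if_neg (by omega)]
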